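-- pv_equiv track=rewrite | github.com/UEFBiomedicalInformaticsLab/BIODAI | MOOCAB/py/util/utils.py | same_len
-- ===== SOURCE A (Python) =====
-- from collections.abc import Sequence, Iterable
--
-- def same_len(sequences: Sequence[Sequence]) -> bool:
--     n_sequences = len(sequences)
--     if n_sequences == 0:
--         return True
--     size = len(sequences[0])
--     for i in range(1, n_sequences):
--         if len(sequences[i]) != size:
--             return False
--     return True
-- ===== SOURCE B (Python) =====
-- def same_len(sequences) -> bool:
--     return len({len(s) for s in sequences}) <= 1
-- ===== Notes on version B (the rewrite author's own statement) =====
-- stated objective: simpler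
-- what changed: Replaces the compare-to-first indexed loop with early exit by building the set of all distinct sequence lengths and checking its cardinality is at most 1.
import Mathlib
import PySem

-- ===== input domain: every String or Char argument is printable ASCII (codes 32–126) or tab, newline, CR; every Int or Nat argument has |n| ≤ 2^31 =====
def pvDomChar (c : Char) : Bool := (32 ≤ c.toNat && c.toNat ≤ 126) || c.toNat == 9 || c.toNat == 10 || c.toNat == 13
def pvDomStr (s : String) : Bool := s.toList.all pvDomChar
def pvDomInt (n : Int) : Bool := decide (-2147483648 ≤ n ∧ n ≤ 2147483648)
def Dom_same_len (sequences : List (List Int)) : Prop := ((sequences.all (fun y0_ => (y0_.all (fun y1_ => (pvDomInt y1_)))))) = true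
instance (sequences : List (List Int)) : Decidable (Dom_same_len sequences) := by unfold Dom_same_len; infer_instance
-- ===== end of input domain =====

-- B replaces A's compare-to-first indexed loop (early exit) by building the set of
-- distinct sequence lengths and checking its cardinality is at most 1 (simpler).


-- ===== PORT A =====
def same_len (sequences : List (List Int)) : Bool :=
  let n : Int := PySem.List.len sequences
  if n == 0 then true
  else
    let size : Int := PySem.List.len (PySem.List.pyGetD sequences 0 [])
    (PySem.List.pyRange 1 n 1).foldl
      (fun acc i => acc && (PySem.List.len (PySem.List.pyGetD sequences i []) == size)) true

-- ===== PORT B =====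
def same_len_alt (sequences : List (List Int)) : Bool :=
  decide ((PySem.Set.ofList (sequences.map (fun s => PySem.List.len s))).length ≤ 1)

-- ===== PRECONDITION & SPEC =====
def Spec_same_len (sequences : List (List Int)) (out : Bool) : Prop := out = same_len_alt sequences
instance (sequences : List (List Int)) (out : Bool) : Decidable (Spec_same_len sequences out) := by unfold Spec_same_len; infer_instance

-- ===== CLAIM (what is proved, stated in full; the proofs are below) =====
def Claim_equal_same_len : Prop := ∀ (sequences : List (List Int)), Dom_same_len sequences → Spec_same_len sequences (same_len sequences)

-- ===== LEMMAS AND PROOFS =====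

-- a fold of '&&' over a list is List.all
theorem foldl_and_eq_all {α : Type} (p : α → Bool) (l : List α) (b : Bool) :
    l.foldl (fun acc v => acc && p v) b = (b && l.all p) := by
  induction l generalizing b with
  | nil => simp
  | cons x t ih => simp [List.foldl_cons, ih, Bool.and_assoc]

theorem foldl_add_const {x : Int} (ys : List Int) (h : ∀ y ∈ ys, y = x) :
    ys.foldl PySem.Set.add [x] = [x] := by
  induction ys with
  | nil => rfl
  | cons y t ih =>
    have hy := h y (by simp)
    subst hy
    simp only [List.foldl_cons, PySem.Set.add, PySem.Set.contains]
    simp only [List.contains_cons, BEq.rfl, Bool.true_or, if_pos]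
    exact ih (fun z hz => h z (by simp [hz]))

theorem setOfList_len_le_one_iff (x : Int) (ys : List Int) :
    (PySem.Set.ofList (x :: ys)).length ≤ 1 ↔ ∀ y ∈ ys, y = x := by
  constructor
  · intro hlen y hy
    have hx : x ∈ PySem.Set.ofList (x :: ys) := by
      rw [PySem.Set.mem_ofList]; simp
    have hy' : y ∈ PySem.Set.ofList (x :: ys) := by
      rw [PySem.Set.mem_ofList]; simp [hy]
    match hs : PySem.Set.ofList (x :: ys), hlen with
    | [], _ => rw [hs] at hx; simp at hx
    | [a], _ =>
      rw [hs] at hx hy'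
      simp at hx hy'
      omega
  · intro h
    have : PySem.Set.ofList (x :: ys) = [x] := by
      rw [PySem.Set.ofList_eq_foldl]
      simp only [List.foldl_cons]
      have : PySem.Set.add [] x = [x] := rfl
      rw [this]
      exact foldl_add_const ys h
    rw [this]; simp

-- ===== VERDICT (by name: the statement is the Claim_ definition above) =====
theorem same_len_spec : Claim_equal_same_len := by
  intro sequences _
  unfold Spec_same_len same_len same_len_alt
  cases sequences with
  | nil => simp [PySem.List.len, PySem.Set.ofList]
  | cons s0 rest =>
    simp only [PySem.List.len_eq]
    rw [if_neg (by simp; omega)]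
    have ha : (PySem.List.pyRange 1 ((s0 :: rest).length : Int) 1).foldl
        (fun acc i => acc && (PySem.List.len (PySem.List.pyGetD (s0 :: rest) i []) == PySem.List.len (PySem.List.pyGetD (s0 :: rest) 0 []))) true
        = rest.foldl (fun acc v => acc && (PySem.List.len v == PySem.List.len (PySem.List.pyGetD (s0 :: rest) 0 []))) true := by
      have := PySem.List.foldl_pyRange_pyGetD' (s0 :: rest) ([] : List Int)
        (fun acc v => acc && (PySem.List.len v == PySem.List.len (PySem.List.pyGetD (s0 :: rest) 0 []))) true (a := 1) (by norm_num)
      simpa using this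
    simp only [PySem.List.len_eq] at ha
    rw [ha, foldl_and_eq_all, Bool.true_and]
    have h0 : PySem.List.pyGetD (s0 :: rest) 0 [] = s0 := by
      simp [pysem]
    rw [h0]
    rw [Bool.eq_iff_iff]
    simp only [List.all_eq_true, decide_eq_true_eq, List.map_cons, setOfList_len_le_one_iff,
      List.forall_mem_map, beq_iff_eq, Nat.cast_inj]
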